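-- pv_equiv track=rewrite | github.com/FargCart/Profile-Generator-Gui | SortingTools.py | SwitchRC
-- ===== SOURCE A (Python) =====
-- def SwitchRC(table):
--     for i in range(0,len(table)):
--         for j in range(i,len(table)):
--             if i!=j:
--                 temp=table[i][j]
--                 table[i][j]=table[j][i]
--                 table[j][i]=temp
--     return table
-- ===== SOURCE B (Python) =====
-- def SwitchRC(table):
--     # snapshot-and-rewrite transpose: copy every row, then overwrite each
--     # off-diagonal cell row[j] with the snapshot's column value (mutates the
--     # original inner lists in place, like A)
--     n = len(table)
--     cols = [list(r) for r in table]
--     for i, row in enumerate(table):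
--         for j in range(n):
--             if j != i:
--                 row[j] = cols[j][i]
--     return table
-- ===== Notes on version B (the rewrite author's own statement) =====
-- stated objective: alternative
-- what changed: Replaces the triangular in-place symmetric-swap loop by a snapshot-then-rewrite pass: copy every row once, then overwrite each off-diagonal cell with the snapshot's mirrored value.
import Mathlib
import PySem

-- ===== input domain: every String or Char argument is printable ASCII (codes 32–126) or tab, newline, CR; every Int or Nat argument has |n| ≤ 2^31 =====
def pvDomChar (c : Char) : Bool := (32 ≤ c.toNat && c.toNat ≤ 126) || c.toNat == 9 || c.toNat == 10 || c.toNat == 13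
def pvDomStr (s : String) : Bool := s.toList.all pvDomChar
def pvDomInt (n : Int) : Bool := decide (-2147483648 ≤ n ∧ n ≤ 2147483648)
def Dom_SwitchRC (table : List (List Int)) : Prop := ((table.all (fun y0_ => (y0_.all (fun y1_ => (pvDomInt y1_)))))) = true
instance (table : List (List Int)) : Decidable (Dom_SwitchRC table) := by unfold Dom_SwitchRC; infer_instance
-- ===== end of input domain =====

-- B replaces A's triangular in-place symmetric-swap loop by a snapshot-then-rewrite pass
-- (copy all rows once, then overwrite every off-diagonal cell from the snapshot); objective:
-- alternative, same cost. Both Pythons mutate `table` in place identically; the theorems are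
-- about the return value. All loop indices come from range/enumerate, hence are ≥ 0, so
-- Nat-indexed getD / set transliterate the Python indexing exactly on Pre_ (raising inputs
-- are excluded by Pre_).

-- ===== PORT A =====
def SwitchRC (table : List (List Int)) : List (List Int) :=
  (List.range table.length).foldl (fun t i =>
    (List.range' i (t.length - i)).foldl (fun t j =>
      if i ≠ j then
        let temp := (t.getD i []).getD j 0
        let t1 := t.set i ((t.getD i []).set j ((t.getD j []).getD i 0))
        t1.set j ((t1.getD j []).set i temp)
      else t) t) table

-- ===== PORT B =====
def SwitchRC_alt (table : List (List Int)) : List (List Int) :=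
  let n := table.length
  let cols := table.map (fun r => r)
  (table.zipIdx).map (fun p =>
    (List.range n).foldl (fun r j =>
      if j ≠ p.2 then r.set j ((cols.getD j []).getD p.2 0) else r) p.1)

-- ===== PRECONDITION & SPEC =====
-- Pre_ is exactly the set of inputs on which the Python A returns (no IndexError): every
-- off-diagonal position (i, j) with i, j < len(table) that A touches must exist in row i.
def Pre_SwitchRC (table : List (List Int)) : Prop :=
  ∀ i < table.length, ∀ j < table.length, i ≠ j → j < (table.getD i []).length
instance (table : List (List Int)) : Decidable (Pre_SwitchRC table) := by
  unfold Pre_SwitchRC; infer_instance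
def pvWitness_SwitchRC : List (List Int) := [[1, 2], [3, 4]]
def Spec_SwitchRC (table : List (List Int)) (out : List (List Int)) : Prop := out = SwitchRC_alt table
instance (table : List (List Int)) (out : List (List Int)) : Decidable (Spec_SwitchRC table out) := by unfold Spec_SwitchRC; infer_instance

-- ===== CLAIM (what is proved, stated in full; the proofs are below) =====
def Claim_equal_SwitchRC : Prop := ∀ (table : List (List Int)), Dom_SwitchRC table → Pre_SwitchRC table → Spec_SwitchRC table (SwitchRC table)

-- ===== LEMMAS AND PROOFS =====

-- the cell table[a][b] of a table state, 0 outside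
def pvCell (t : List (List Int)) (a b : Nat) : Int := (t.getD a []).getD b 0

-- the body of A's inner loop
def pvStepA (i j : Nat) (t : List (List Int)) : List (List Int) :=
  if i ≠ j then
    let temp := (t.getD i []).getD j 0
    let t1 := t.set i ((t.getD i []).set j ((t.getD j []).getD i 0))
    t1.set j ((t1.getD j []).set i temp)
  else t

lemma SwitchRC_eq_fold (table : List (List Int)) :
    SwitchRC table = (List.range table.length).foldl (fun t i =>
      (List.range' i (t.length - i)).foldl (fun t j => pvStepA i j t) t) table := rfl

lemma getD_set_eq {α : Type} (l : List α) (m a : Nat) (x d : α) :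
    (l.set m x).getD a d = if a = m ∧ m < l.length then x else l.getD a d := by
  simp only [List.getD_eq_getElem?_getD, List.getElem?_set]
  by_cases h1 : m = a
  · subst h1
    by_cases h2 : m < l.length <;> simp [h2]
  · have h1' : ¬ a = m := fun h => h1 h.symm
    simp [h1, h1']

lemma stepA_len (i j : Nat) (t : List (List Int)) : (pvStepA i j t).length = t.length := by
  unfold pvStepA; split <;> simp

lemma stepA_rowlen (i j : Nat) (t : List (List Int)) (a : Nat) :
    ((pvStepA i j t).getD a []).length = (t.getD a []).length := by
  unfold pvStepA
  split
  · simp only [getD_set_eq, List.length_set]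
    split_ifs <;> simp_all
  · rfl

lemma stepA_cell (i j : Nat) (t : List (List Int)) (hij : i ≠ j)
    (hi : i < t.length) (hj : j < t.length)
    (hji : j < (t.getD i []).length) (hij2 : i < (t.getD j []).length) (a b : Nat) :
    pvCell (pvStepA i j t) a b =
      if a = i ∧ b = j then pvCell t j i
      else if a = j ∧ b = i then pvCell t i j
      else pvCell t a b := by
  unfold pvStepA pvCell
  rw [if_pos hij]
  simp only [getD_set_eq, List.length_set]
  split_ifs <;> simp_all [List.getElem?_set] <;> split_ifs <;> simp_all

-- invariant after A has processed all pairs (i', j'), i' < j', lexicographically below (i, j₀)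
def pvInv (table : List (List Int)) (i j₀ : Nat) (t : List (List Int)) : Prop :=
  t.length = table.length ∧
  (∀ a, (t.getD a []).length = (table.getD a []).length) ∧
  (∀ a b, pvCell t a b =
    if a ≠ b ∧ a < table.length ∧ b < table.length ∧
        (min a b < i ∨ (min a b = i ∧ max a b < j₀)) then
      pvCell table b a
    else pvCell table a b)

lemma innerA (table : List (List Int)) (hPre : Pre_SwitchRC table) (i : Nat)
    (hi : i < table.length) :
    ∀ (c j₀ : Nat) (t : List (List Int)), j₀ + c = table.length → i ≤ j₀ →
      pvInv table i j₀ t →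
      pvInv table (i + 1) (i + 1) ((List.range' j₀ c).foldl (fun t j => pvStepA i j t) t) := by
  intro c
  induction c with
  | zero =>
    intro j₀ t h1 h2 hinv
    simp only [List.range'_zero, List.foldl_nil]
    refine ⟨hinv.1, hinv.2.1, fun a b => ?_⟩
    rw [hinv.2.2 a b]
    exact if_congr (by omega) rfl rfl
  | succ c ih =>
    intro j₀ t h1 h2 hinv
    rw [List.range'_succ, List.foldl_cons]
    by_cases hj : i = j₀
    · have hstep : pvStepA i j₀ t = t := by
        unfold pvStepA; rw [if_neg (by omega)]
      rw [hstep]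
      refine ih (j₀ + 1) t (by omega) (by omega) ⟨hinv.1, hinv.2.1, fun a b => ?_⟩
      rw [hinv.2.2 a b]
      exact if_congr (by omega) rfl rfl
    · have hij : i < j₀ := by omega
      have hjn : j₀ < table.length := by omega
      have hi' : i < t.length := by rw [hinv.1]; exact hi
      have hj' : j₀ < t.length := by rw [hinv.1]; exact hjn
      have hji : j₀ < (t.getD i []).length := by
        rw [hinv.2.1 i]; exact hPre i hi j₀ hjn (by omega)
      have hij2 : i < (t.getD j₀ []).length := by
        rw [hinv.2.1 j₀]; exact hPre j₀ hjn i hi (by omega)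
      refine ih (j₀ + 1) (pvStepA i j₀ t) (by omega) (by omega)
        ⟨(stepA_len i j₀ t).trans hinv.1,
         fun a => (stepA_rowlen i j₀ t a).trans (hinv.2.1 a),
         fun a b => ?_⟩
      rw [stepA_cell i j₀ t (by omega) hi' hj' hji hij2 a b]
      by_cases hab1 : a = i ∧ b = j₀
      · obtain ⟨ha, hb⟩ := hab1; subst ha; subst hb
        rw [if_pos ⟨rfl, rfl⟩, hinv.2.2 b a, if_neg (by omega), if_pos (by omega)]
      · rw [if_neg hab1]
        by_cases hab2 : a = j₀ ∧ b = i
        · obtain ⟨ha, hb⟩ := hab2; subst ha; subst hb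
          rw [if_pos ⟨rfl, rfl⟩, hinv.2.2 b a, if_neg (by omega), if_pos (by omega)]
        · rw [if_neg hab2, hinv.2.2 a b]
          exact if_congr (by omega) rfl rfl

lemma outerA (table : List (List Int)) (hPre : Pre_SwitchRC table) :
    ∀ (c k : Nat) (t : List (List Int)), k + c = table.length →
      pvInv table k k t →
      pvInv table table.length table.length
        ((List.range' k c).foldl (fun t i =>
          (List.range' i (t.length - i)).foldl (fun t j => pvStepA i j t) t) t) := by
  intro c
  induction c with
  | zero =>
    intro k t h1 hinv
    simp only [List.range'_zero, List.foldl_nil]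
    have hk : k = table.length := by omega
    rw [hk] at hinv; exact hinv
  | succ c ih =>
    intro k t h1 hinv
    rw [List.range'_succ, List.foldl_cons]
    have hk : k < table.length := by omega
    have hlen : t.length - k = k + (c + 1) - k := by rw [hinv.1, ← h1]
    rw [hlen]
    exact ih (k + 1)
      ((List.range' k (k + (c + 1) - k)).foldl (fun t j => pvStepA k j t) t) (by omega)
      (innerA table hPre k hk (k + (c + 1) - k) k t (by omega) (le_refl k) hinv)

lemma A_char (table : List (List Int)) (hPre : Pre_SwitchRC table) :
    pvInv table table.length table.length (SwitchRC table) := by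
  rw [SwitchRC_eq_fold, List.range_eq_range']
  exact outerA table hPre table.length 0 table (by omega)
    ⟨rfl, fun a => rfl, fun a b => (if_neg (by omega)).symm⟩

lemma rowB_char (i m : Nat) (r0 : List Int) (v : Nat → Int) :
    (((List.range m).foldl (fun r j => if j ≠ i then r.set j (v j) else r) r0).length
        = r0.length) ∧
    (∀ b, ((List.range m).foldl (fun r j => if j ≠ i then r.set j (v j) else r) r0).getD b 0 =
      if b < m ∧ b ≠ i ∧ b < r0.length then v b else r0.getD b 0) := by
  induction m with
  | zero =>
    refine ⟨rfl, fun b => ?_⟩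
    rw [if_neg (by omega), List.range_zero, List.foldl_nil]
  | succ m ih =>
    rw [List.range_succ, List.foldl_append, List.foldl_cons, List.foldl_nil]
    by_cases hmi : m ≠ i
    · rw [if_pos hmi]
      refine ⟨by rw [List.length_set]; exact ih.1, fun b => ?_⟩
      rw [getD_set_eq, ih.1, ih.2 b]
      by_cases hbm : b = m
      · subst hbm
        by_cases hlen : b < r0.length
        · rw [if_pos ⟨rfl, hlen⟩, if_pos ⟨by omega, hmi, hlen⟩]
        · rw [if_neg (by omega), if_neg (by omega), if_neg (by omega)]
      · rw [if_neg (by omega)]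
        exact if_congr (by omega) rfl rfl
    · rw [if_neg hmi]
      refine ⟨ih.1, fun b => ?_⟩
      rw [ih.2 b]
      exact if_congr (by omega) rfl rfl

lemma B_len (table : List (List Int)) : (SwitchRC_alt table).length = table.length := by
  unfold SwitchRC_alt
  simp

lemma B_row (table : List (List Int)) (a : Nat) (ha : a < table.length) :
    (SwitchRC_alt table).getD a [] =
      (List.range table.length).foldl
        (fun r j => if j ≠ a then r.set j (pvCell table j a) else r) (table.getD a []) := by
  unfold SwitchRC_alt
  have hza : a < (table.zipIdx.map (fun p : List Int × Nat =>
      (List.range table.length).foldl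
        (fun r j => if j ≠ p.2 then r.set j (((table.map fun r => r).getD j []).getD p.2 0) else r)
        p.1)).length := by simp [ha]
  rw [List.getD_eq_getElem _ _ hza, List.getElem_map, List.getElem_zipIdx]
  simp only [List.map_id_fun', id_eq, zero_add]
  rw [← List.getD_eq_getElem table [] (by simpa using ha)]
  rfl

-- ===== VERDICT (by name: the statement is the Claim_ definition above) =====
theorem SwitchRC_spec : Claim_equal_SwitchRC := by
  intro table _ hPre
  unfold Spec_SwitchRC
  obtain ⟨hAl, hArow, hAcell⟩ := A_char table hPre
  have hBrow := fun (a : Nat) =>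
    rowB_char a table.length (table.getD a []) (fun j => pvCell table j a)
  apply List.ext_getElem (by rw [hAl, B_len])
  intro a h1 h2
  have ha : a < table.length := by rwa [hAl] at h1
  rw [← List.getD_eq_getElem _ [] h1, ← List.getD_eq_getElem _ [] h2, B_row table a ha]
  apply List.ext_getElem
  · rw [hArow a, (hBrow a).1]
  intro b hb1 hb2
  rw [← List.getD_eq_getElem _ (0 : Int) hb1, ← List.getD_eq_getElem _ (0 : Int) hb2]
  have hB := (hBrow a).2 b
  have hA := hAcell a b
  show pvCell (SwitchRC table) a b = _
  rw [hA, hB]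
  by_cases hc : a ≠ b ∧ b < table.length
  · have hlen2 : b < (table.getD a []).length := hPre a ha b hc.2 hc.1
    rw [if_pos ⟨hc.1, ha, hc.2, by omega⟩, if_pos ⟨hc.2, by omega, hlen2⟩]
  · rw [if_neg (by omega), if_neg (by omega)]
    rfl
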